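-- pv_equiv track=rewrite | github.com/wuyinjun-1993/Chef | process_data/utils_process_data.py | get_all_label_combination
-- ===== SOURCE A (Python) =====
-- from copy import deepcopy
--
-- def get_all_label_combination(worker_count):
--
--     worker_label_combinations = []
--
--     for i in range(worker_count):
--         if i == 0:
--             worker_label_combinations.append([0])
--             worker_label_combinations.append([1])
--
--         else:
--
--             worker_label_combination_count = len(worker_label_combinations)
--
--             worker_label_combinations.extend(deepcopy(worker_label_combinations))
--
--             for k in range(worker_label_combination_count):
--                 worker_label_combinations[k].append(0)
--             for k in range(worker_label_combination_count):
--                 worker_label_combinations[k+worker_label_combination_count].append(1)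
--
--     return worker_label_combinations
-- ===== SOURCE B (Python) =====
-- def get_all_label_combination(worker_count):
--     if worker_count <= 0:
--         return []
--     result = []
--     for j in range(2 ** worker_count):
--         row = []
--         x = j
--         for _ in range(worker_count):
--             row.append(x % 2)
--             x //= 2
--         result.append(row)
--     return result
-- ===== Notes on version B (the rewrite author's own statement) =====
-- stated objective: simpler
-- what changed: Replaces A's iterative doubling (deepcopy the list, append 0 to the first half and 1 to the second) by directly mapping each index j in range(2**worker_count) to its worker_count least-significant bits via repeated divmod.
import Mathlib
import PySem

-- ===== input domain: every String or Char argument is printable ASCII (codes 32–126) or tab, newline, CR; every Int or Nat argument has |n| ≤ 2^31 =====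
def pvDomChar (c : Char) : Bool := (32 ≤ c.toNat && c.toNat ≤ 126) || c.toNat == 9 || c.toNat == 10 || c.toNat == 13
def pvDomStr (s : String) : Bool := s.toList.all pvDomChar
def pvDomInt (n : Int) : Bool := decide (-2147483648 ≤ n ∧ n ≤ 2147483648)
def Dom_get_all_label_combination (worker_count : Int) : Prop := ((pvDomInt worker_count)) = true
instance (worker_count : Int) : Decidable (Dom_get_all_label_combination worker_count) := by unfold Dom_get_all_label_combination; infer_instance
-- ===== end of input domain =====

-- B replaces A's deepcopy-and-double accumulation by a direct index-to-bits mapping (simpler, one formulaic pass).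
-- ===== PORT A =====
-- step of A's loop body: i == 0 appends [0],[1]; otherwise extend with a copy,
-- append 0 to the first half and 1 to the second half
def get_all_label_combination (worker_count : Int) : List (List Int) :=
  (PySem.List.pyRange 0 worker_count 1).foldl
    (fun acc i =>
      if i == 0 then (acc ++ [[0]]) ++ [[1]]
      else
        let cnt := acc.length
        let ext := acc ++ acc
        ((ext.take cnt).map (fun l => l ++ [0])) ++ ((ext.drop cnt).map (fun l => l ++ [1])))
    []

-- ===== PORT B =====
-- inner loop of B: worker_count times, emit x % 2 then x //= 2
def pvBitsOf (x : Int) : Nat → List Int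
  | 0 => []
  | k + 1 => PySem.Int.mod x 2 :: pvBitsOf (PySem.Int.floordiv x 2) k

def get_all_label_combination_alt (worker_count : Int) : List (List Int) :=
  if worker_count ≤ 0 then []
  else
    -- 2 ** worker_count: worker_count > 0 here, so the Nat exponent is exact
    (PySem.List.pyRange 0 ((2 : Int) ^ worker_count.toNat) 1).map
      (fun j => pvBitsOf j worker_count.toNat)

-- ===== PRECONDITION & SPEC =====
def Spec_get_all_label_combination (worker_count : Int) (out : List (List Int)) : Prop := out = get_all_label_combination_alt worker_count
instance (worker_count : Int) (out : List (List Int)) : Decidable (Spec_get_all_label_combination worker_count out) := by unfold Spec_get_all_label_combination; infer_instance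

-- ===== CLAIM (what is proved, stated in full; the proofs are below) =====
def Claim_equal_get_all_label_combination : Prop := ∀ (worker_count : Int), Dom_get_all_label_combination worker_count → Spec_get_all_label_combination worker_count (get_all_label_combination worker_count)

-- ===== LEMMAS AND PROOFS =====

-- Nat-side bit list: bits j n = LSB-first bits of j, n of them
def pvBitsN (j : Nat) : Nat → List Int
  | 0 => []
  | n + 1 => ((j % 2 : Nat) : Int) :: pvBitsN (j / 2) n

theorem pvBitsN_succ (j n : Nat) :
    pvBitsN j (n + 1) = ((j % 2 : Nat) : Int) :: pvBitsN (j / 2) n := rfl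

theorem pvBitsOf_natCast (j : Nat) (n : Nat) : pvBitsOf (j : Int) n = pvBitsN j n := by
  induction n generalizing j with
  | zero => rfl
  | succ n ih =>
    have hm : PySem.Int.mod (j : Int) 2 = ((j % 2 : Nat) : Int) := by
      exact_mod_cast PySem.Int.mod_natCast j 2
    have hf : PySem.Int.floordiv (j : Int) 2 = ((j / 2 : Nat) : Int) := by
      exact_mod_cast PySem.Int.floordiv_natCast j 2
    show PySem.Int.mod (j : Int) 2 :: pvBitsOf (PySem.Int.floordiv (j : Int) 2) n =
      pvBitsN j (n + 1)
    rw [hm, hf, ih, pvBitsN_succ]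

theorem pvBitsN_lt (j n : Nat) (h : j < 2 ^ n) : pvBitsN j (n + 1) = pvBitsN j n ++ [0] := by
  induction n generalizing j with
  | zero => interval_cases j <;> rfl
  | succ n ih =>
    have hj : j / 2 < 2 ^ n := by omega
    rw [pvBitsN_succ j (n + 1), pvBitsN_succ j n, ih (j / 2) hj]
    rfl

theorem pvBitsN_add (j n : Nat) (h : j < 2 ^ n) :
    pvBitsN (2 ^ n + j) (n + 1) = pvBitsN j n ++ [1] := by
  induction n generalizing j with
  | zero => interval_cases j <;> rfl
  | succ n ih =>
    have hmod : (2 ^ (n + 1) + j) % 2 = j % 2 := by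
      have : 2 ^ (n + 1) % 2 = 0 := by simp [pow_succ, Nat.mul_mod]
      omega
    have hdiv : (2 ^ (n + 1) + j) / 2 = 2 ^ n + j / 2 := by
      have : 2 ^ (n + 1) = 2 ^ n * 2 := pow_succ 2 n
      omega
    have hj : j / 2 < 2 ^ n := by omega
    rw [pvBitsN_succ (2 ^ (n + 1) + j) (n + 1), pvBitsN_succ j n, hmod, hdiv,
      ih (j / 2) hj]
    rfl

-- closed form for one step of A on the closed-form state
theorem pvRangeBits_succ (n : Nat) :
    (List.range (2 ^ (n + 1))).map (fun j => pvBitsN j (n + 1)) =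
      ((List.range (2 ^ n)).map (fun j => pvBitsN j n ++ [0])) ++
      ((List.range (2 ^ n)).map (fun j => pvBitsN j n ++ [1])) := by
  have hsplit : 2 ^ (n + 1) = 2 ^ n + 2 ^ n := by ring
  rw [hsplit, List.range_add, List.map_append, List.map_map]
  congr 1
  · exact List.map_congr_left (fun j hj => pvBitsN_lt j n (List.mem_range.mp hj))
  · exact List.map_congr_left (fun j hj => by
      simpa using pvBitsN_add j n (List.mem_range.mp hj))

-- A's loop, run over range(n) for Nat n ≥ 1, equals the closed form
theorem pvA_foldl (n : Nat) (hn : 1 ≤ n) :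
    get_all_label_combination (n : Int) =
      (List.range (2 ^ n)).map (fun j => pvBitsN j n) := by
  induction n with
  | zero => omega
  | succ n ih =>
    by_cases h1 : n = 0
    · subst h1; decide
    · have hn' : 1 ≤ n := by omega
      have hrange : PySem.List.pyRange 0 ((n : Int) + 1) 1 =
          PySem.List.pyRange 0 (n : Int) 1 ++ [(n : Int)] := by
        exact PySem.List.pyRange_one_succ_right (by positivity)
      unfold get_all_label_combination at ih ⊢
      push_cast
      rw [hrange, List.foldl_append]
      rw [ih hn']
      have hne : ((n : Int) == 0) = false := by
        simp [h1]
      simp only [List.foldl_cons, List.foldl_nil, hne, Bool.false_eq_true, if_false]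
      rw [pvRangeBits_succ]
      simp [Function.comp_def]

-- B on a positive Nat is the closed form too
theorem pvB_closed (n : Nat) (hn : 1 ≤ n) :
    get_all_label_combination_alt (n : Int) =
      (List.range (2 ^ n)).map (fun j => pvBitsN j n) := by
  unfold get_all_label_combination_alt
  have h0 : ¬ ((n : Int) ≤ 0) := by exact_mod_cast by omega
  rw [if_neg h0]
  have htn : ((n : Int)).toNat = n := by simp
  rw [htn]
  have hpow : ((2 : Int) ^ n) = ((2 ^ n : Nat) : Int) := by push_cast; ring
  rw [hpow, PySem.List.pyRange_zero_nat]
  rw [List.map_map]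
  exact List.map_congr_left (fun j _ => pvBitsOf_natCast j n)

-- ===== VERDICT (by name: the statement is the Claim_ definition above) =====
theorem get_all_label_combination_spec : Claim_equal_get_all_label_combination := by
  intro wc _
  unfold Spec_get_all_label_combination
  by_cases h : wc ≤ 0
  · unfold get_all_label_combination get_all_label_combination_alt
    rw [PySem.List.pyRange_one_eq_nil h, if_pos h]
    rfl
  · obtain ⟨n, rfl⟩ : ∃ n : Nat, wc = (n : Int) :=
      ⟨wc.toNat, by omega⟩
    have hn : 1 ≤ n := by omega
    rw [pvA_foldl n hn, pvB_closed n hn]
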